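-- pv_equiv track=rewrite | github.com/aligempf/adventofcode2018 | day16/puzzle2.py | pullOutConfirmed
-- ===== SOURCE A (Python) =====
-- def pullOutConfirmed(possibleFunctions, confirmedFunctions):
--     for code in possibleFunctions:
--         for confirmedFunction in confirmedFunctions.values():
--             if confirmedFunction in possibleFunctions[code]:
--                 if code in confirmedFunctions:
--                     if not confirmedFunctions[code] == confirmedFunction:
--                         possibleFunctions[code].remove(confirmedFunction)
--                 else:
--                     possibleFunctions[code].remove(confirmedFunction)
--     return possibleFunctions
-- ===== SOURCE B (Python) =====
-- def pullOutConfirmed(possibleFunctions, confirmedFunctions):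
--     # Count every confirmed value once, then sweep each possibility list in a
--     # single left-to-right pass, dropping the first `count` occurrences of each
--     # confirmed value (the code's own confirmed value is never dropped).
--     counts = {}
--     for v in confirmedFunctions.values():
--         counts[v] = counts.get(v, 0) + 1
--     for code in possibleFunctions:
--         need = dict(counts)
--         if code in confirmedFunctions:
--             need[confirmedFunctions[code]] = 0
--         kept = []
--         for x in possibleFunctions[code]:
--             c = need.get(x, 0)
--             if c > 0:
--                 need[x] = c - 1
--             else:
--                 kept.append(x)
--         possibleFunctions[code] = kept
--     return possibleFunctions
-- ===== Notes on version B (the rewrite author's own statement) =====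
-- stated objective: faster
-- what changed: B builds one counter of the confirmed values and then sweeps each possibility list in a single left-to-right pass that drops the first counted occurrences, replacing A's per-confirmed-value membership test plus list.remove rescan of each list.
import Mathlib
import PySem

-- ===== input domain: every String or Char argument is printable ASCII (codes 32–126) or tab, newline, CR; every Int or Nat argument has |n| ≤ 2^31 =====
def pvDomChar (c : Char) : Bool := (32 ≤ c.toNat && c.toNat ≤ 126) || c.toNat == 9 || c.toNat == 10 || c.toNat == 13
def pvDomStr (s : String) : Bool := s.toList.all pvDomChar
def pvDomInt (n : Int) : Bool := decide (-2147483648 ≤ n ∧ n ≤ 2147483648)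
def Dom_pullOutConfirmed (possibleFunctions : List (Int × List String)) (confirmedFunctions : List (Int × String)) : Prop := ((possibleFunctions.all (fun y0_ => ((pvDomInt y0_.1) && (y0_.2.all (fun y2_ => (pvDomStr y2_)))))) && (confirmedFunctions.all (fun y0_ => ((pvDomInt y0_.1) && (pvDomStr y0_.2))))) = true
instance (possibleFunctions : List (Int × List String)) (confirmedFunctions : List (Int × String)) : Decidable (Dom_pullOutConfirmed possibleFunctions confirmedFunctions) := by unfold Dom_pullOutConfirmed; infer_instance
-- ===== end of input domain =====

-- B replaces A's per-confirmed-value rescans of each possibility list by one counter of the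
-- confirmed values plus a single left-to-right sweep of each list (objective: faster; measured).
-- Both A and B mutate the possibleFunctions dict in place in Python; the equivalence proved
-- here is about the RETURN value.

-- ===== PORT A =====
def pullOutConfirmed (possibleFunctions : List (Int × List String)) (confirmedFunctions : List (Int × String)) : List (Int × List String) :=
  let cfd := PySem.Dict.mk confirmedFunctions
  (((PySem.Dict.mk possibleFunctions).keys).foldl (fun d code =>
      cfd.values.foldl (fun d v =>
        let lst := PySem.Dict.getD d code []
        if v ∈ lst then
          if cfd.contains code then
            if ¬ (cfd.getD code "" == v) then
              d.insert code ((PySem.List.remove? lst v).getD lst)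
            else d
          else d.insert code ((PySem.List.remove? lst v).getD lst)
        else d) d)
    (PySem.Dict.mk possibleFunctions)).items

-- ===== PORT B =====
def pullOutConfirmed_alt (possibleFunctions : List (Int × List String)) (confirmedFunctions : List (Int × String)) : List (Int × List String) :=
  let cfd := PySem.Dict.mk confirmedFunctions
  let counts := cfd.values.foldl (fun c v => c.insert v (c.getD v 0 + 1)) PySem.Dict.empty
  possibleFunctions.map (fun p =>
    let need := if cfd.contains p.1 then counts.insert (cfd.getD p.1 "") 0 else counts
    (p.1, (p.2.foldl (fun (acc : PySem.Dict String Int × List String) x =>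
        let c := acc.1.getD x 0
        if 0 < c then (acc.1.insert x (c - 1), acc.2)
        else (acc.1, acc.2 ++ [x])) (need, ([] : List String))).2))

-- ===== PRECONDITION & SPEC =====
-- Pre_ excludes association lists with duplicate keys: a Python dict cannot have duplicate
-- keys, so such lists do not represent any input the Python function receives.
def Pre_pullOutConfirmed (possibleFunctions : List (Int × List String)) (confirmedFunctions : List (Int × String)) : Prop :=
  (possibleFunctions.map Prod.fst).Nodup ∧ (confirmedFunctions.map Prod.fst).Nodup
instance (possibleFunctions : List (Int × List String)) (confirmedFunctions : List (Int × String)) : Decidable (Pre_pullOutConfirmed possibleFunctions confirmedFunctions) := by unfold Pre_pullOutConfirmed; infer_instance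
def pvWitness_pullOutConfirmed : (List (Int × List String)) × (List (Int × String)) :=
  ([(0, ["a", "b", "a"]), (1, ["b", "c"])], [(0, "a"), (1, "a")])

def Spec_pullOutConfirmed (possibleFunctions : List (Int × List String)) (confirmedFunctions : List (Int × String)) (out : List (Int × List String)) : Prop := out = pullOutConfirmed_alt possibleFunctions confirmedFunctions
instance (possibleFunctions : List (Int × List String)) (confirmedFunctions : List (Int × String)) (out : List (Int × List String)) : Decidable (Spec_pullOutConfirmed possibleFunctions confirmedFunctions out) := by unfold Spec_pullOutConfirmed; infer_instance

-- ===== CLAIM (what is proved, stated in full; the proofs are below) =====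
def Claim_equal_pullOutConfirmed : Prop := ∀ (possibleFunctions : List (Int × List String)) (confirmedFunctions : List (Int × String)), Dom_pullOutConfirmed possibleFunctions confirmedFunctions → Pre_pullOutConfirmed possibleFunctions confirmedFunctions → Spec_pullOutConfirmed possibleFunctions confirmedFunctions (pullOutConfirmed possibleFunctions confirmedFunctions)

-- ===== LEMMAS AND PROOFS =====

-- `vs.foldl erase lst`: A's per-code effect at the list level
def pvErase (vs lst : List String) : List String := vs.foldl (fun l v => l.erase v) lst

-- own-value guard shared by both sides
def pvOwn (cfd : PySem.Dict Int String) (code : Int) (v : String) : Bool :=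
  cfd.contains code && (cfd.getD code "" == v)

theorem pvErase_nil (vs : List String) : pvErase vs [] = [] := by
  induction vs with
  | nil => rfl
  | cons v vs ih => simpa [pvErase, List.erase_nil] using ih

theorem pvErase_cons (x : String) (rest vs : List String) :
    pvErase vs (x :: rest) = if x ∈ vs then pvErase (vs.erase x) rest else x :: pvErase vs rest := by
  induction vs generalizing rest with
  | nil => simp [pvErase]
  | cons v vs ih =>
    by_cases hvx : v = x
    · subst hvx
      simp [pvErase, List.erase_cons_head]
    · have h1 : (x :: rest).erase v = x :: rest.erase v := by
        rw [List.erase_cons_tail]; simp [Ne.symm hvx]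
      have h2 : (v :: vs).erase x = v :: vs.erase x := by
        rw [List.erase_cons_tail]; simp [hvx]
      have unf : ∀ r : List String, pvErase (v :: vs) r = pvErase vs (r.erase v) := fun _ => rfl
      rw [unf (x :: rest), h1, ih (rest.erase v)]
      by_cases hx : x ∈ vs
      · rw [if_pos hx, if_pos (List.mem_cons_of_mem v hx), h2]
        rfl
      · rw [if_neg hx, if_neg (show x ∉ v :: vs by
          simp only [List.mem_cons, not_or]
          exact ⟨fun h => hvx h.symm, hx⟩)]
        rfl

-- A's inner loop over the confirmed values, at the list level, is pvErase of the filtered values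
theorem foldA_list (cfd : PySem.Dict Int String) (code : Int) (vs : List String) :
    ∀ lst : List String,
      vs.foldl (fun lst v =>
        if v ∈ lst then
          if cfd.contains code then
            if ¬ (cfd.getD code "" == v) then (PySem.List.remove? lst v).getD lst else lst
          else (PySem.List.remove? lst v).getD lst
        else lst) lst
      = pvErase (vs.filter (fun v => !pvOwn cfd code v)) lst := by
  induction vs with
  | nil => intro lst; rfl
  | cons v vs ih =>
    intro lst
    have hstep : (if v ∈ lst then
          if cfd.contains code then
            if ¬ (cfd.getD code "" == v) then (PySem.List.remove? lst v).getD lst else lst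
          else (PySem.List.remove? lst v).getD lst
        else lst) = if pvOwn cfd code v then lst else lst.erase v := by
      by_cases hm : v ∈ lst
      · rw [PySem.List.remove?_eq_some_erase _ _ hm]
        by_cases hc : cfd.contains code
        · by_cases he : cfd.getD code "" == v
          · simp [pvOwn, hm, hc, he]
          · simp [pvOwn, hm, hc, he]
        · simp [pvOwn, hm, hc]
      · have : lst.erase v = lst := List.erase_of_not_mem hm
        by_cases ho : pvOwn cfd code v <;> simp [hm, ho, this]
    simp only [List.foldl_cons]
    rw [hstep]
    by_cases ho : pvOwn cfd code v
    · rw [if_pos ho, ih lst, List.filter_cons]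
      simp [ho]
    · rw [if_neg (by simp [ho]), ih (lst.erase v), List.filter_cons]
      simp only [ho, Bool.not_false, if_pos]
      rfl

-- B's one-pass sweep equals pvErase when the counter holds the multiset of values to remove
theorem sweep_eq (lst : List String) :
    ∀ (vs : List String) (c : PySem.Dict String Int) (kept : List String),
      (∀ x, c.getD x 0 = (vs.count x : Int)) →
      (lst.foldl (fun (acc : PySem.Dict String Int × List String) x =>
          let cc := acc.1.getD x 0
          if 0 < cc then (acc.1.insert x (cc - 1), acc.2)
          else (acc.1, acc.2 ++ [x])) (c, kept)).2
        = kept ++ pvErase vs lst := by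
  induction lst with
  | nil => intro vs c kept h; simp [pvErase_nil]
  | cons x rest ih =>
    intro vs c kept h
    simp only [List.foldl_cons]
    by_cases hpos : 0 < c.getD x 0
    · have hmem : x ∈ vs := by
        have hx := h x
        exact List.count_pos_iff.mp (by omega)
      rw [if_pos hpos]
      have h' : ∀ y, (c.insert x (c.getD x 0 - 1)).getD y 0 = ((vs.erase x).count y : Int) := by
        intro y
        rw [PySem.Dict.getD_insert]
        by_cases hyx : y = x
        · rw [if_pos hyx, hyx, List.count_erase_self, h x]
          have hpos' : 1 ≤ List.count x vs := List.count_pos_iff.mpr hmem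
          omega
        · rw [if_neg hyx, List.count_erase_of_ne hyx, h y]
      rw [ih (vs.erase x) _ kept h', pvErase_cons, if_pos hmem]
    · have hmem : x ∉ vs := by
        have hx := h x
        have : vs.count x = 0 := by omega
        exact List.count_eq_zero.mp this
      rw [if_neg hpos]
      rw [ih vs c (kept ++ [x]) h, pvErase_cons, if_neg hmem, List.append_assoc,
        List.singleton_append]

-- A's per-code transformation of a possibility list
def pvG (cfd : PySem.Dict Int String) (code : Int) (lst : List String) : List String :=
  pvErase ((cfd.values).filter (fun v => !pvOwn cfd code v)) lst

theorem pvInsert_getD_self {κ ν : Type} [BEq κ] [LawfulBEq κ] (d : PySem.Dict κ ν) (k : κ)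
    (d0 : ν) (hc : d.contains k = true) (hnd : d.keys.Nodup) :
    d.insert k (d.getD k d0) = d := by
  apply PySem.Dict.ext
  rw [PySem.Dict.items_insert_of_contains _ _ hc]
  have hcg : ∀ p ∈ d.items, (if p.1 == k then (k, d.getD k d0) else p) = p := by
    intro p hp
    by_cases hpk : p.1 == k
    · have hk : p.1 = k := by simpa using hpk
      have hmem : (k, p.2) ∈ d.items := by rw [← hk]; exact hp
      have := PySem.Dict.getD_of_mem_items _ hmem hnd d0
      rw [if_pos hpk, this, ← hk]
    · rw [if_neg hpk]
  rw [List.map_congr_left hcg]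
  simp

-- the dict-level inner loop of A is one overwrite of key `code` by the list-level loop
theorem inner_eq (cfd : PySem.Dict Int String) (vs : List String) :
    ∀ (d : PySem.Dict Int (List String)) (code : Int),
      d.contains code = true → d.keys.Nodup →
      vs.foldl (fun d v =>
          let lst := PySem.Dict.getD d code []
          if v ∈ lst then
            if cfd.contains code then
              if ¬ (cfd.getD code "" == v) then
                d.insert code ((PySem.List.remove? lst v).getD lst)
              else d
            else d.insert code ((PySem.List.remove? lst v).getD lst)
          else d) d
      = d.insert code (vs.foldl (fun lst v =>
          if v ∈ lst then
            if cfd.contains code then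
              if ¬ (cfd.getD code "" == v) then (PySem.List.remove? lst v).getD lst else lst
            else (PySem.List.remove? lst v).getD lst
          else lst) (d.getD code [])) := by
  induction vs with
  | nil =>
    intro d code hc hnd
    exact (pvInsert_getD_self d code [] hc hnd).symm
  | cons v vs ih =>
    intro d code hc hnd
    have ihc := fun d hcd hnd => ih d code hcd hnd
    simp only [List.foldl_cons]
    by_cases hcc : cfd.contains code = true
    · simp only [hcc, ite_true] at ihc ⊢
      have hstep := fun lst' : List String => by
        have hc' : (d.insert code lst').contains code = true :=
          PySem.Dict.contains_insert_self d code lst'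
        have hnd' : (d.insert code lst').keys.Nodup := by
          rw [PySem.Dict.keys_insert_of_contains d lst' hc]; exact hnd
        have h := ihc (d.insert code lst') hc' hnd'
        rwa [PySem.Dict.getD_insert_self, PySem.Dict.insert_insert_self] at h
      split_ifs with hm he <;> first | exact ihc d hc hnd | exact hstep _
    · simp only [hcc, Bool.false_eq_true, ite_false] at ihc ⊢
      have hstep := fun lst' : List String => by
        have hc' : (d.insert code lst').contains code = true :=
          PySem.Dict.contains_insert_self d code lst'
        have hnd' : (d.insert code lst').keys.Nodup := by
          rw [PySem.Dict.keys_insert_of_contains d lst' hc]; exact hnd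
        have h := ihc (d.insert code lst') hc' hnd'
        rwa [PySem.Dict.getD_insert_self, PySem.Dict.insert_insert_self] at h
      split_ifs with hm <;> first | exact ihc d hc hnd | exact hstep _

-- folding A's per-code overwrite over distinct present keys rewrites the items pointwise
theorem outer_items (g : Int → List String → List String)
    (F : PySem.Dict Int (List String) → Int → PySem.Dict Int (List String))
    (hF : ∀ (d : PySem.Dict Int (List String)) (code : Int),
      d.contains code = true → d.keys.Nodup →
      F d code = d.insert code (g code (d.getD code []))) :
    ∀ (ks : List Int) (d : PySem.Dict Int (List String)),
      d.keys.Nodup → (∀ k ∈ ks, d.contains k = true) → ks.Nodup →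
      (ks.foldl F d).items
        = d.items.map (fun p => if p.1 ∈ ks then (p.1, g p.1 p.2) else p) := by
  intro ks
  induction ks with
  | nil => intro d _ _ _; simp
  | cons code ks ih =>
    intro d hnd hks hnodup
    have hc : d.contains code = true := hks code (List.mem_cons_self ..)
    simp only [List.foldl_cons]
    rw [hF d code hc hnd]
    have hnd' : (d.insert code (g code (d.getD code []))).keys.Nodup := by
      rw [PySem.Dict.keys_insert_of_contains d _ hc]; exact hnd
    have hks' : ∀ k ∈ ks, (d.insert code (g code (d.getD code []))).contains k = true := by
      intro k hk
      rw [PySem.Dict.contains_insert]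
      simp [hks k (List.mem_cons_of_mem _ hk)]
    rw [ih _ hnd' hks' (List.Nodup.of_cons hnodup)]
    rw [PySem.Dict.items_insert_of_contains d _ hc, List.map_map]
    apply List.map_congr_left
    intro p hp
    have hcode_not : code ∉ ks := (List.nodup_cons.mp hnodup).1
    by_cases hpk : p.1 = code
    · have hmem : (code, p.2) ∈ d.items := by rw [← hpk]; exact hp
      have hval : d.getD code [] = p.2 := PySem.Dict.getD_of_mem_items d hmem hnd []
      simp only [Function.comp_apply, hpk, BEq.rfl, if_pos]
      simp [hcode_not, hval]
    · simp only [Function.comp_apply, show (p.1 == code) = false by simpa using hpk]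
      by_cases hpks : p.1 ∈ ks
      · simp [hpks, hpk]
      · simp [hpks, hpk]

-- the counter built by B holds, for each code, the multiset of values A's loop erases
theorem need_count (cfd : PySem.Dict Int String) (code : Int) (x : String) :
    (if cfd.contains code then
        (cfd.values.foldl (fun c v => c.insert v (c.getD v 0 + 1)) PySem.Dict.empty).insert
          (cfd.getD code "") 0
      else cfd.values.foldl (fun c v => c.insert v (c.getD v 0 + 1)) PySem.Dict.empty).getD x 0
    = (((cfd.values).filter (fun v => !pvOwn cfd code v)).count x : Int) := by
  have hcounter : (cfd.values.foldl (fun c v => c.insert v (c.getD v 0 + 1))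
      PySem.Dict.empty).getD x 0 = (cfd.values.count x : Int) := by
    rw [PySem.Dict.foldl_insert_getD_add_one_eq_counter, PySem.Dict.getD_counter]
  by_cases hc : cfd.contains code
  · rw [if_pos hc, PySem.Dict.getD_insert]
    by_cases hx : x = cfd.getD code ""
    · rw [if_pos hx]
      have : x ∉ (cfd.values).filter (fun v => !pvOwn cfd code v) := by
        intro hmem
        have := List.of_mem_filter hmem
        simp [pvOwn, hc, hx] at this
      rw [List.count_eq_zero.mpr this]
      simp
    · rw [if_neg hx, hcounter, List.count_filter]
      simp [pvOwn, hc]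
      exact fun h => hx h.symm
  · rw [if_neg hc, hcounter]
    have : (cfd.values).filter (fun v => !pvOwn cfd code v) = cfd.values := by
      apply List.filter_eq_self.mpr
      intro v _
      simp [pvOwn, hc]
    rw [this]

-- ===== VERDICT (by name: the statement is the Claim_ definition above) =====
theorem pullOutConfirmed_spec : Claim_equal_pullOutConfirmed := by
  intro pf cf _hdom hpre
  obtain ⟨hpf, hcf⟩ := hpre
  unfold Spec_pullOutConfirmed pullOutConfirmed pullOutConfirmed_alt
  simp only []
  have hnd : (PySem.Dict.mk pf).keys.Nodup := by
    rw [PySem.Dict.keys_mk]; exact hpf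
  have hcontains : ∀ k ∈ (PySem.Dict.mk pf).keys, (PySem.Dict.mk pf).contains k = true :=
    fun k hk => ((PySem.Dict.mk pf).contains_iff_mem_keys k).mpr hk
  have hF : ∀ (d : PySem.Dict Int (List String)) (code : Int),
      d.contains code = true → d.keys.Nodup →
      (PySem.Dict.mk cf).values.foldl (fun d v =>
          let lst := PySem.Dict.getD d code []
          if v ∈ lst then
            if (PySem.Dict.mk cf).contains code then
              if ¬ ((PySem.Dict.mk cf).getD code "" == v) then
                d.insert code ((PySem.List.remove? lst v).getD lst)
              else d
            else d.insert code ((PySem.List.remove? lst v).getD lst)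
          else d) d
        = d.insert code (pvG (PySem.Dict.mk cf) code (d.getD code [])) := by
    intro d code hcd hndd
    rw [inner_eq (PySem.Dict.mk cf) (PySem.Dict.mk cf).values d code hcd hndd,
      foldA_list (PySem.Dict.mk cf) code (PySem.Dict.mk cf).values]
    rfl
  refine ((outer_items (pvG (PySem.Dict.mk cf)) _ hF (PySem.Dict.mk pf).keys
      (PySem.Dict.mk pf) hnd hcontains hnd).trans ?_)
  show pf.map _ = _
  have hin : ∀ p ∈ pf,
      (if p.1 ∈ (PySem.Dict.mk pf).keys then (p.1, pvG (PySem.Dict.mk cf) p.1 p.2) else p)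
        = (p.1, pvG (PySem.Dict.mk cf) p.1 p.2) := by
    intro p hp
    have : p.1 ∈ (PySem.Dict.mk pf).keys := by
      rw [PySem.Dict.keys_mk]
      exact List.mem_map_of_mem hp
    rw [if_pos this]
  rw [List.map_congr_left hin]
  apply List.map_congr_left
  intro p _
  have h := sweep_eq p.2
      ((PySem.Dict.mk cf).values.filter (fun v => !pvOwn (PySem.Dict.mk cf) p.1 v)) _ []
      (fun x => need_count (PySem.Dict.mk cf) p.1 x)
  rw [h]
  simp [pvG]
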